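-- pv_equiv track=rewrite | github.com/longbuivan/dotfile | handbook/data_camping/week3/sample_code/hackerrank/findNumberSequence.py | findNumberSequence
-- ===== SOURCE A (Python) =====
-- def findNumberSequence(direction):
--     '''
--     Description: Finding the sequence of numbers placed n the segment in the order of their placement points.
--     Param:
--         - direction (str): A string of length n where ('L' and 'R') idicate th direction of the turn. Ex: LRLLR
--     Return:
--         - result (list): An integer list of sequence of numbers placed on the segment after ordered by direction
--     Time Complexity: O(n log n) due to sorting the positions
--     '''
--     n = len(direction)
--     segment_start = 0
--     segment_end = 2 ** n
--     positions = []
--     values = []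
--
--     if n < 1 or n > 10**5:
--         raise ValueError("Input size exceeds the allowed limit")
--
--     for i in range(n):
--
--         center = (segment_start + segment_end) // 2 # Note: Change due to MemoryError
--         # center = segment_start + (segment_end - segment_start) // 2
--         positions.append(center)
--         values.append(i + 1)
--
--         if direction[i] == 'L':
--             segment_end = center
--         else:
--             segment_start = center
--
--     combined = list(zip(positions, values))
--     combined.sort()
--
--     result = [value for _, value in combined]
--
--     return result
-- ===== SOURCE B (Python) =====
-- def findNumberSequence(direction):
--     # Point i is left of every later point iff direction[i-1] == 'R':
--     # so the placement order is all 'R' indices ascending, then all 'L' indices descending.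
--     rights = []
--     lefts = []
--     for i, c in enumerate(direction, 1):
--         if c == 'L':
--             lefts.append(i)
--         else:
--             rights.append(i)
--     lefts.reverse()
--     return rights + lefts
-- ===== Notes on version B (the rewrite author's own statement) =====
-- stated objective: faster
-- what changed: A simulates the interval bisection with n-bit big integers and then sorts the (position, value) pairs; B uses the observation that point i precedes every later point iff direction[i-1] != 'L', so the placement order is exactly the non-'L' indices ascending followed by the 'L' indices descending, built in one linear pass with no big-integer arithmetic and no sort.
import Mathlib
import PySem

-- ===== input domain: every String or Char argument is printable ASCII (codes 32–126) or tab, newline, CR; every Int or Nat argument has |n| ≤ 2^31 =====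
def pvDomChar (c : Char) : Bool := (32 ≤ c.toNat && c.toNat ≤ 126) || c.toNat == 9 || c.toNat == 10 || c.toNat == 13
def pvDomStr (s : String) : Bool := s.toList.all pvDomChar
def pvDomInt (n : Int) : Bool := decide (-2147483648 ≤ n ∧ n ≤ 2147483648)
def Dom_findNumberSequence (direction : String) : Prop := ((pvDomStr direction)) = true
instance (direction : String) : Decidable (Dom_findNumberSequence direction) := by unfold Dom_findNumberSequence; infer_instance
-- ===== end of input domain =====

-- B replaces A's interval bisection with bignum midpoints plus a sort by one linear
-- pass: 'R' indices ascending followed by 'L' indices descending (measured faster).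

-- ===== PORT A =====
-- the loop 'for i in range(n)' over direction[i], carrying (segment_start, segment_end, positions, values)
def loopA : List Char → Int → Int → Int → List Int → List Int → List Int × List Int
  | [], _, _, _, pos, vals => (pos, vals)
  | c :: cs, i, s, e, pos, vals =>
    let center := PySem.Int.floordiv (s + e) 2
    let pos' := pos ++ [center]
    let vals' := vals ++ [i + 1]
    if c = 'L' then loopA cs (i + 1) s center pos' vals'
    else loopA cs (i + 1) center e pos' vals'

def findNumberSequence (direction : String) : List Int :=
  let cs := direction.toList
  let n : Int := cs.length
  if n < 1 ∨ n > 10^5 then []   -- Python raises ValueError here; excluded by Pre_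
  else
    let pv := loopA cs 0 0 ((2 : Int) ^ cs.length) [] []
    let combined := pv.1.zip pv.2
    let sortedC := PySem.List.sorted2 combined Prod.fst Prod.snd   -- combined.sort(): lexicographic on pairs
    sortedC.map Prod.snd

-- ===== PORT B =====
-- the loop 'for i, c in enumerate(direction, 1)' filling rights/lefts
def loopB : List Char → Int → List Int → List Int → List Int × List Int
  | [], _, r, l => (r, l)
  | c :: cs, i, r, l =>
    if c = 'L' then loopB cs (i + 1) r (l ++ [i])
    else loopB cs (i + 1) (r ++ [i]) l

def findNumberSequence_alt (direction : String) : List Int :=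
  let rl := loopB direction.toList 1 [] []
  rl.1 ++ rl.2.reverse

-- ===== PRECONDITION & SPEC =====
-- Pre_ excludes exactly the inputs where A raises ValueError: the empty string and strings longer than 10^5.
def Pre_findNumberSequence (direction : String) : Prop :=
  1 ≤ direction.toList.length ∧ direction.toList.length ≤ 10^5
instance (direction : String) : Decidable (Pre_findNumberSequence direction) := by
  unfold Pre_findNumberSequence; infer_instance

def pvWitness_findNumberSequence : String := "LRLLR"

def Spec_findNumberSequence (direction : String) (out : List Int) : Prop := out = findNumberSequence_alt direction
instance (direction : String) (out : List Int) : Decidable (Spec_findNumberSequence direction out) := by unfold Spec_findNumberSequence; infer_instance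

-- ===== CLAIM (what is proved, stated in full; the proofs are below) =====
def Claim_equal_findNumberSequence : Prop := ∀ (direction : String), Dom_findNumberSequence direction → Pre_findNumberSequence direction → Spec_findNumberSequence direction (findNumberSequence direction)

-- ===== LEMMAS AND PROOFS =====

-- A's (position, value) pairs, without the accumulators
def comb : List Char → Int → Int → Int → List (Int × Int)
  | [], _, _, _ => []
  | c :: cs, v, s, e =>
    let m := PySem.Int.floordiv (s + e) 2
    (m, v) :: (if c = 'L' then comb cs (v + 1) s m else comb cs (v + 1) m e)

-- the same pairs rearranged into position order
def combRes : List Char → Int → Int → Int → List (Int × Int)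
  | [], _, _, _ => []
  | c :: cs, v, s, e =>
    let m := PySem.Int.floordiv (s + e) 2
    if c = 'L' then combRes cs (v + 1) s m ++ [(m, v)] else (m, v) :: combRes cs (v + 1) m e

-- the values in position order
def res : List Char → Int → List Int
  | [], _ => []
  | c :: cs, v => if c = 'L' then res cs (v + 1) ++ [v] else v :: res cs (v + 1)

-- B's two halves
def rts : List Char → Int → List Int
  | [], _ => []
  | c :: cs, v => if c = 'L' then rts cs (v + 1) else v :: rts cs (v + 1)

def lts : List Char → Int → List Int
  | [], _ => []
  | c :: cs, v => if c = 'L' then v :: lts cs (v + 1) else lts cs (v + 1)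

lemma mid_eq (s e : Int) (k : Nat) (h : e - s = 2 ^ (k + 1)) :
    PySem.Int.floordiv (s + e) 2 = s + 2 ^ k := by
  rw [PySem.Int.floordiv_eq_ediv_of_pos (by norm_num)]
  have h2 : (2 : Int) ^ (k + 1) = 2 * 2 ^ k := by ring
  omega

lemma combRes_bounds : ∀ (cs : List Char) (v s e : Int), e - s = 2 ^ cs.length →
    ∀ p ∈ combRes cs v s e, s < p.1 ∧ p.1 < e := by
  intro cs
  induction cs with
  | nil => intro v s e _ p hp; simp [combRes] at hp
  | cons c cs ih =>
    intro v s e h p hp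
    have hm : PySem.Int.floordiv (s + e) 2 = s + 2 ^ cs.length := mid_eq s e cs.length (by simpa using h)
    have hpow : (0 : Int) < 2 ^ cs.length := by positivity
    have h2 : (2 : Int) ^ (cs.length + 1) = 2 * 2 ^ cs.length := by ring
    simp only [combRes, hm] at hp
    by_cases hc : c = 'L'
    · simp only [if_pos hc, List.mem_append, List.mem_singleton] at hp
      rcases hp with hp | hp
      · have := ih (v + 1) s (s + 2 ^ cs.length) (by omega) p hp
        simp only [List.length_cons] at h
        constructor <;> omega
      · subst hp; simp only [List.length_cons] at h; constructor <;> omega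
    · simp only [if_neg hc, List.mem_cons] at hp
      rcases hp with hp | hp
      · subst hp; simp only [List.length_cons] at h; constructor <;> omega
      · have := ih (v + 1) (s + 2 ^ cs.length) e (by simp only [List.length_cons] at h; omega) p hp
        constructor <;> omega

lemma combRes_pairwise : ∀ (cs : List Char) (v s e : Int), e - s = 2 ^ cs.length →
    (combRes cs v s e).Pairwise (fun a b => a.1 < b.1) := by
  intro cs
  induction cs with
  | nil => intro v s e _; simp [combRes]
  | cons c cs ih =>
    intro v s e h
    have hm : PySem.Int.floordiv (s + e) 2 = s + 2 ^ cs.length := mid_eq s e cs.length (by simpa using h)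
    have hpow : (0 : Int) < 2 ^ cs.length := by positivity
    simp only [List.length_cons] at h
    have h2 : (2 : Int) ^ (cs.length + 1) = 2 * 2 ^ cs.length := by ring
    simp only [combRes, hm]
    by_cases hc : c = 'L'
    · simp only [if_pos hc]
      refine List.pairwise_append.mpr ⟨ih (v + 1) s (s + 2 ^ cs.length) (by omega), by simp, ?_⟩
      intro a ha b hb
      simp only [List.mem_singleton] at hb
      subst hb
      exact (combRes_bounds cs (v + 1) s (s + 2 ^ cs.length) (by omega) a ha).2
    · simp only [if_neg hc]
      refine List.pairwise_cons.mpr ⟨?_, ih (v + 1) (s + 2 ^ cs.length) e (by omega)⟩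
      intro b hb
      exact (combRes_bounds cs (v + 1) (s + 2 ^ cs.length) e (by omega) b hb).1

lemma combRes_perm : ∀ (cs : List Char) (v s e : Int),
    (combRes cs v s e).Perm (comb cs v s e) := by
  intro cs
  induction cs with
  | nil => intro v s e; simp [combRes, comb]
  | cons c cs ih =>
    intro v s e
    simp only [combRes, comb]
    by_cases hc : c = 'L'
    · simp only [if_pos hc]
      exact (List.perm_append_singleton _ _).trans ((ih _ _ _).cons _)
    · simp only [if_neg hc]
      exact (ih _ _ _).cons _

lemma combRes_map_snd : ∀ (cs : List Char) (v s e : Int),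
    (combRes cs v s e).map Prod.snd = res cs v := by
  intro cs
  induction cs with
  | nil => intro v s e; simp [combRes, res]
  | cons c cs ih =>
    intro v s e
    simp only [combRes, res]
    by_cases hc : c = 'L'
    · simp [if_pos hc, ih]
    · simp [if_neg hc, ih]

lemma insertBy_congr {α : Type} (before before' : α → α → Bool) (x : α) :
    ∀ acc : List α, (∀ b ∈ acc, before x b = before' x b) →
    PySem.List.insertBy before x acc = PySem.List.insertBy before' x acc := by
  intro acc
  induction acc with
  | nil => intro _; rfl
  | cons y ys ih =>
    intro h
    simp only [PySem.List.insertBy]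
    rw [h y (by simp)]
    by_cases hb : before' x y = true
    · simp [hb]
    · simp only [hb]
      rw [ih (fun b hb' => h b (by simp [hb']))]

lemma foldl_insertBy_congr {α : Type} (before before' : α → α → Bool) (P : α → Prop)
    (H : ∀ a b, P a → P b → before a b = before' a b) :
    ∀ (xs acc : List α), (∀ a ∈ xs, P a) → (∀ a ∈ acc, P a) →
    xs.foldl (fun acc x => PySem.List.insertBy before x acc) acc
      = xs.foldl (fun acc x => PySem.List.insertBy before' x acc) acc := by
  intro xs
  induction xs with
  | nil => intro acc _ _; rfl
  | cons x xs ih =>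
    intro acc hxs hacc
    simp only [List.foldl_cons]
    have hx : P x := hxs x (by simp)
    rw [insertBy_congr before before' x acc (fun b hb => H x b hx (hacc b hb))]
    refine ih _ (fun a ha => hxs a (by simp [ha])) ?_
    intro a ha
    rcases (PySem.List.mem_insertBy _ _ _ _).mp ha with rfl | ha'
    · exact hx
    · exact hacc a ha'

lemma sorted2_eq_sorted_fst (xs : List (Int × Int))
    (h : ∀ a ∈ xs, ∀ b ∈ xs, a.1 = b.1 → a = b) :
    PySem.List.sorted2 xs Prod.fst Prod.snd = PySem.List.sorted xs Prod.fst := by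
  rw [PySem.List.sorted_eq_foldl_insertBy]
  show xs.foldl (fun acc x => PySem.List.insertBy
      (fun a b => decide (a.1 < b.1) || !decide (b.1 < a.1) && decide (a.2 < b.2)) x acc) []
      = _
  refine foldl_insertBy_congr _ _ (· ∈ xs) ?_ xs [] (fun a ha => ha) (by simp)
  intro a b ha hb
  by_cases h1 : a.1 = b.1
  · have : a = b := h a ha b hb h1
    subst this
    simp
  · rcases lt_trichotomy a.1 b.1 with hlt | heq | hgt
    · simp [hlt, not_lt.mpr (le_of_lt hlt)]
    · exact absurd heq h1
    · simp [hgt, not_lt.mpr (le_of_lt hgt)]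

lemma sorted2_comb (cs : List Char) (v s e : Int) (h : e - s = 2 ^ cs.length) :
    PySem.List.sorted2 (comb cs v s e) Prod.fst Prod.snd = combRes cs v s e := by
  have hpw := combRes_pairwise cs v s e h
  have hperm := combRes_perm cs v s e
  have hsymm : Symmetric (fun a b : Int × Int => a.1 ≠ b.1) := fun _ _ h => Ne.symm h
  have hne : (comb cs v s e).Pairwise (fun a b => a.1 ≠ b.1) :=
    (List.Perm.pairwise_iff (fun {_ _} h => Ne.symm h) hperm).mp (hpw.imp (fun hab => ne_of_lt hab))
  have hinj : ∀ a ∈ comb cs v s e, ∀ b ∈ comb cs v s e, a.1 = b.1 → a = b := by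
    intro a ha b hb heq
    by_contra hab
    exact (hne.forall hsymm ha hb hab) heq
  rw [sorted2_eq_sorted_fst _ hinj]
  exact PySem.List.sorted_eq_of_perm_of_pairwise_lt _ _ _ hperm hpw

lemma loopA_zip : ∀ (cs : List Char) (i s e : Int) (pos vals : List Int),
    pos.length = vals.length →
    (loopA cs i s e pos vals).1.zip (loopA cs i s e pos vals).2
      = pos.zip vals ++ comb cs (i + 1) s e := by
  intro cs
  induction cs with
  | nil => intro i s e pos vals _; simp [loopA, comb]
  | cons c cs ih =>
    intro i s e pos vals hlen
    simp only [loopA, comb]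
    have hz : (pos ++ [PySem.Int.floordiv (s + e) 2]).zip (vals ++ [i + 1])
        = pos.zip vals ++ [(PySem.Int.floordiv (s + e) 2, i + 1)] := by
      rw [List.zip_append hlen]; rfl
    by_cases hc : c = 'L'
    · simp only [if_pos hc]
      rw [ih _ _ _ _ _ (by simp [hlen]), hz, List.append_assoc, List.singleton_append]
    · simp only [if_neg hc]
      rw [ih _ _ _ _ _ (by simp [hlen]), hz, List.append_assoc, List.singleton_append]

lemma loopB_spec : ∀ (cs : List Char) (i : Int) (r l : List Int),
    loopB cs i r l = (r ++ rts cs i, l ++ lts cs i) := by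
  intro cs
  induction cs with
  | nil => intro i r l; simp [loopB, rts, lts]
  | cons c cs ih =>
    intro i r l
    simp only [loopB, rts, lts]
    by_cases hc : c = 'L'
    · simp [if_pos hc, ih]
    · simp [if_neg hc, ih]

lemma res_split : ∀ (cs : List Char) (v : Int),
    res cs v = rts cs v ++ (lts cs v).reverse := by
  intro cs
  induction cs with
  | nil => intro v; simp [res, rts, lts]
  | cons c cs ih =>
    intro v
    simp only [res, rts, lts]
    by_cases hc : c = 'L'
    · simp [if_pos hc, ih]
    · simp [if_neg hc, ih]

-- ===== VERDICT (by name: the statement is the Claim_ definition above) =====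
theorem findNumberSequence_spec : Claim_equal_findNumberSequence := by
  intro direction _ hpre
  unfold Spec_findNumberSequence
  obtain ⟨h1, h2⟩ := hpre
  unfold findNumberSequence findNumberSequence_alt
  simp only []
  rw [if_neg (by push_cast; omega)]
  rw [loopA_zip direction.toList 0 0 ((2 : Int) ^ direction.toList.length) [] [] rfl]
  simp only [List.zip_nil_left, List.nil_append, zero_add]
  rw [sorted2_comb direction.toList 1 0 ((2 : Int) ^ direction.toList.length) (by ring)]
  rw [combRes_map_snd, loopB_spec]
  simp [res_split]
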